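-- pv_equiv track=rewrite | github.com/ament/ament_tools | ament_tools/helper.py | extract_argument_group
-- ===== SOURCE A (Python) =====
-- def extract_argument_group(args, delimiting_option):
--     """
--     Extract a group of arguments from a list of arguments using a delimiter.
--
--     Here is an example:
--
--     .. code-block:: python
--
--         >>> extract_argument_group(['foo', '--args', 'bar', '--baz'], '--args')
--         (['foo'], ['bar', '--baz'])
--
--     The group can always be ended using the double hyphen ``--``.
--     In order to pass a double hyphen as arguments, use three hyphens ``---``.
--     Any set of hyphens encountered after the delimiter, and up to ``--``, which
--     have three or more hyphens and are isolated, will be captured and reduced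
--     by one hyphen.
--
--     For example:
--
--     .. code-block:: python
--
--         >> extract_argument_group(['foo',
--                                    '--args', 'bar', '--baz', '---', '--',
--                                    '--foo-option'], '--args')
--         (['foo', '--foo-option'], ['bar', '--baz', '--'])
--
--     In the result the ``--`` comes from the ``---`` in the input.
--     The ``--args`` and the corresponding ``--`` are removed entirely.
--
--     The delimiter and ``--`` terminator combination can also happen multiple
--     times, in which case the bodies of arguments are combined and returned in
--     the order they appeared.
--
--     For example:
--
--     .. code-block:: python
--
--         >> extract_argument_group(['foo',
--                                    '--args', 'ping', '--',
--                                    'bar',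
--                                    '--args', 'pong', '--',
--                                    'baz',
--                                    '--args', '--'], '--args')
--         (['foo', 'bar', 'baz'], ['ping', 'pong'])
--
--     Note: ``--`` cannot be used as the ``delimiting_option``.
--
--     :param list args: list of strings which are ordered arguments.
--     :param str delimiting_option: option which denotes where to split the args.
--     :returns: tuple of arguments before and after the delimiter.
--     :rtype: tuple
--     :raises: ValueError if the delimiting_option is ``--``.
--     """
--     if delimiting_option == '--':
--         raise ValueError("Cannot use '--' as the delimiter")
--     if delimiting_option not in args:
--         return args, []
--     trimmed_args = args
--     extracted_args = []
--     # Loop through all arguments extracting groups of arguments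
--     while True:
--         try:
--             next_delimiter = trimmed_args.index(delimiting_option)
--         except ValueError:
--             # No delimiter's left in the arguments, stop looking
--             break
--         # Capture and remove args after the delimiter
--         tail = trimmed_args[next_delimiter + 1:]
--         trimmed_args = trimmed_args[:next_delimiter]
--         # Look for a terminator, '--'
--         next_terminator = None
--         try:
--             next_terminator = tail.index('--')
--         except ValueError:
--             pass
--         if next_terminator is None:
--             # No terminator, put all args in extracted_args and stop looking
--             extracted_args.extend(tail)
--             break
--         else:
--             # Terminator found, put args up, but not including terminator
--             # in extracted_args
--             extracted_args.extend(tail[:next_terminator])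
--             # And put arguments after the terminator back in trimmed_args
--             # then continue looking for additional delimiters
--             trimmed_args.extend(tail[next_terminator + 1:])
--     # Iterate through extracted args and shorted tokens with 3+ -'s only
--     for i, token in enumerate(extracted_args):
--         # '--' should have been removed from extracted_args in the above loop
--         assert token != '--', "this shouldn't happen"
--         # Skip single hyphens
--         if token == '-':
--             continue
--         # Check for non-hyphen characters
--         if [c for c in token if c != '-']:
--             # contains something other than -, continue
--             continue
--         # Must be only hyphens with more than two, Shorted by one -
--         extracted_args[i] = token[1:]
--     return trimmed_args, extracted_args
-- ===== SOURCE B (Python) =====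
-- def extract_argument_group(args, delimiting_option):
--     """Single left-to-right pass with an in-group flag, instead of
--     repeated index()/slice scans."""
--     if delimiting_option == '--':
--         raise ValueError("Cannot use '--' as the delimiter")
--     trimmed = []
--     extracted = []
--     in_group = False
--     for token in args:
--         if in_group:
--             if token == '--':
--                 in_group = False
--             elif token != '-' and all(c == '-' for c in token):
--                 extracted.append(token[1:])
--             else:
--                 extracted.append(token)
--         elif token == delimiting_option:
--             in_group = True
--         else:
--             trimmed.append(token)
--     return trimmed, extracted
-- ===== Notes on version B (the rewrite author's own statement) =====
-- stated objective: alternative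
-- what changed: Replaces the repeated index()/slice/extend rebuilding of the argument list with a single left-to-right pass keeping an in-group flag and applying the hyphen reduction inline.
import Mathlib
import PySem

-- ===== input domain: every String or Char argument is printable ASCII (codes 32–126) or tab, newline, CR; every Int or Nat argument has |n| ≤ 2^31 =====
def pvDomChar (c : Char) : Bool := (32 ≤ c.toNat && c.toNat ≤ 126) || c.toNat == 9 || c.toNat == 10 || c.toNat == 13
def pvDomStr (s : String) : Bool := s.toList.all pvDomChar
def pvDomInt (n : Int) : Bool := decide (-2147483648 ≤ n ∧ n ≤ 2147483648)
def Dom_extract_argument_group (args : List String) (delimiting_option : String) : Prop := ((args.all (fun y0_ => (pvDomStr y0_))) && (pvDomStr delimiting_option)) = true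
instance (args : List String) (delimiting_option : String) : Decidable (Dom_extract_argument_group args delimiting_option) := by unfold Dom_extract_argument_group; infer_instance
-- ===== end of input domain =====

-- B replaces A's repeated index()/slice/extend rebuilding of the list by one
-- left-to-right pass with an in-group flag (alternative algorithm, same observed cost).


-- ===== PORT A =====
-- The while-loop of A: state (trimmed_args, extracted_args).  The fuel argument is
-- only a totality device: the loop strictly shrinks trimmed, so trimmed.length + 1
-- fuel always suffices (proved in aLoop_spec).
def aLoop (d : String) : Nat → List String → List String → List String × List String
  | 0, trimmed, extracted => (trimmed, extracted)
  | fuel + 1, trimmed, extracted =>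
    match PySem.List.index? trimmed d with
    | none => (trimmed, extracted)                    -- except ValueError: break
    | some nd =>
      let tail := PySem.List.slice trimmed (some ((nd : Int) + 1)) none       -- trimmed_args[next_delimiter+1:]
      let trimmed' := PySem.List.slice trimmed none (some (nd : Int))         -- trimmed_args[:next_delimiter]
      match PySem.List.index? tail "--" with
      | none => (trimmed', extracted ++ tail)         -- no terminator: extend & break
      | some nt =>
        aLoop d fuel (trimmed' ++ PySem.List.slice tail (some ((nt : Int) + 1)) none)
                     (extracted ++ PySem.List.slice tail none (some (nt : Int)))

-- The final for-loop of A: each extracted token is rewritten in place, independently,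
-- so the in-place index loop is a map.
def aReduce (token : String) : String :=
  if token = "-" then token                           -- skip single hyphens
  else if (token.toList.filter (fun c => c ≠ '-')) ≠ [] then token  -- [c for c in token if c != '-']
  else PySem.Str.slice token (some 1) none            -- token[1:]

def extract_argument_group (args : List String) (delimiting_option : String) : List String × List String :=
  if delimiting_option = "--" then ([], [])           -- A raises ValueError here; excluded by Pre_
  else if delimiting_option ∉ args then (args, [])
  else
    let (trimmed, extracted) := aLoop delimiting_option (args.length + 1) args []
    (trimmed, extracted.map aReduce)

-- ===== PORT B =====
-- Source B's loop body: state ((trimmed, extracted), in_group)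
def bStep (d : String) (st : (List String × List String) × Bool) (token : String) :
    (List String × List String) × Bool :=
  let ((trimmed, extracted), inGroup) := st
  if inGroup then
    if token = "--" then ((trimmed, extracted), false)
    else if token ≠ "-" ∧ token.toList.all (fun c => c = '-') then
      ((trimmed, extracted ++ [PySem.Str.slice token (some 1) none]), true)
    else ((trimmed, extracted ++ [token]), true)
  else if token = d then ((trimmed, extracted), true)
  else ((trimmed ++ [token], extracted), false)

def extract_argument_group_alt (args : List String) (delimiting_option : String) : List String × List String :=
  if delimiting_option = "--" then ([], [])           -- Source B raises ValueError here; excluded by Pre_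
  else (args.foldl (bStep delimiting_option) (([], []), false)).1

-- ===== PRECONDITION & SPEC =====
-- Pre_ excludes exactly delimiting_option = "--", where both A and B raise ValueError.
def Pre_extract_argument_group (args : List String) (delimiting_option : String) : Prop :=
  delimiting_option ≠ "--"
instance (args : List String) (delimiting_option : String) : Decidable (Pre_extract_argument_group args delimiting_option) := by unfold Pre_extract_argument_group; infer_instance

def pvWitness_extract_argument_group : List String × String :=
  (["foo", "--args", "bar", "--baz"], "--args")

def Spec_extract_argument_group (args : List String) (delimiting_option : String) (out : List String × List String) : Prop := out = extract_argument_group_alt args delimiting_option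
instance (args : List String) (delimiting_option : String) (out : List String × List String) : Decidable (Spec_extract_argument_group args delimiting_option out) := by unfold Spec_extract_argument_group; infer_instance

-- ===== CLAIM (what is proved, stated in full; the proofs are below) =====
def Claim_equal_extract_argument_group : Prop := ∀ (args : List String) (delimiting_option : String), Dom_extract_argument_group args delimiting_option → Pre_extract_argument_group args delimiting_option → Spec_extract_argument_group args delimiting_option (extract_argument_group args delimiting_option)

-- ===== LEMMAS AND PROOFS =====

-- Proof-side specification of the single pass, without the hyphen reduction:
-- pass0 d g ts = (tokens that end up outside groups, raw tokens captured inside groups),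
-- starting in state g (true = inside a group).
def pass0 (d : String) : Bool → List String → List String × List String
  | _, [] => ([], [])
  | true, t :: ts =>
      if t = "--" then pass0 d false ts
      else ((pass0 d true ts).1, t :: (pass0 d true ts).2)
  | false, t :: ts =>
      if t = d then pass0 d true ts
      else (t :: (pass0 d false ts).1, (pass0 d false ts).2)

lemma pass0_false_not_mem (d : String) (ts : List String) (h : d ∉ ts) :
    pass0 d false ts = (ts, []) := by
  induction ts with
  | nil => rfl
  | cons t ts ih =>
    simp only [List.mem_cons, not_or] at h
    simp [pass0, Ne.symm h.1, ih h.2]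

lemma pass0_true_not_mem (d : String) (ts : List String) (h : "--" ∉ ts) :
    pass0 d true ts = ([], ts) := by
  induction ts with
  | nil => rfl
  | cons t ts ih =>
    simp only [List.mem_cons, not_or] at h
    simp [pass0, Ne.symm h.1, ih h.2]

lemma pass0_false_append (d : String) (pre ts : List String) (h : d ∉ pre) :
    pass0 d false (pre ++ ts) = (pre ++ (pass0 d false ts).1, (pass0 d false ts).2) := by
  induction pre with
  | nil => simp
  | cons t pre ih =>
    simp only [List.mem_cons, not_or] at h
    simp [pass0, Ne.symm h.1, ih h.2]

lemma pass0_true_append (d : String) (pre ts : List String) (h : "--" ∉ pre) :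
    pass0 d true (pre ++ ts) = ((pass0 d true ts).1, pre ++ (pass0 d true ts).2) := by
  induction pre with
  | nil => simp
  | cons t pre ih =>
    simp only [List.mem_cons, not_or] at h
    simp [pass0, Ne.symm h.1, ih h.2]

-- index? on an appended list whose left part misses the key
lemma index?_append_not_mem {α : Type} [DecidableEq α] (P l : List α) (v : α) (h : v ∉ P) :
    PySem.List.index? (P ++ l) v = (PySem.List.index? l v).map (· + P.length) := by
  induction P with
  | nil => simp
  | cons x P ih =>
    simp only [List.mem_cons, not_or] at h
    rw [List.cons_append, PySem.List.index?_cons_of_ne _ (Ne.symm h.1), ih h.2]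
    cases PySem.List.index? l v <;> simp <;> omega

-- A's loop, run on trimmed = P ++ rest with the settled prefix P containing no delimiter,
-- computes pass0 on rest.
lemma aLoop_spec (d : String) (fuel : Nat) :
    ∀ rest P E, rest.length ≤ fuel → d ∉ P →
      aLoop d (fuel + 1) (P ++ rest) E = (P ++ (pass0 d false rest).1, E ++ (pass0 d false rest).2) := by
  induction fuel with
  | zero =>
    intro rest P E hlen hP
    have : rest = [] := List.length_eq_zero_iff.mp (Nat.le_zero.mp hlen)
    subst this
    have hidx : PySem.List.index? (P ++ ([] : List String)) d = none := by
      rw [PySem.List.index?_eq_none_iff]; simpa using hP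
    simp only [aLoop, hidx, pass0]
    simp
  | succ n ih =>
    intro rest P E hlen hP
    by_cases hmem : d ∈ rest
    · -- rest = pre ++ d :: tail, d ∉ pre
      obtain ⟨k, hk⟩ := Option.isSome_iff_exists.mp ((PySem.List.index?_isSome_iff _ _).mpr hmem)
      obtain ⟨pre, tail, hrest, hklen, hdpre⟩ := (PySem.List.index?_eq_some_iff _ _ _).mp hk
      subst hrest
      have hidx : PySem.List.index? (P ++ (pre ++ d :: tail)) d = some (k + P.length) := by
        rw [index?_append_not_mem _ _ _ hP, hk]; rfl
      simp only [aLoop, hidx]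
      have hsl1 : PySem.List.slice (P ++ (pre ++ d :: tail)) (some (((k + P.length : Nat) : Int) + 1)) none
          = tail := by
        rw [show (((k + P.length : Nat) : Int) + 1) = ((k + P.length + 1 : Nat) : Int) by push_cast; ring,
            PySem.List.slice_from_natCast]
        rw [show P ++ (pre ++ d :: tail) = (P ++ pre ++ [d]) ++ tail by simp]
        rw [List.drop_append_of_le_length (by simp; omega)]
        simp [hklen]; omega
      have hsl2 : PySem.List.slice (P ++ (pre ++ d :: tail)) none (some ((k + P.length : Nat) : Int))
          = P ++ pre := by
        rw [PySem.List.slice_to_natCast]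
        rw [show P ++ (pre ++ d :: tail) = (P ++ pre) ++ (d :: tail) by simp]
        rw [List.take_append_of_le_length (by simp; omega)]
        apply List.take_of_length_le; simp; omega
      rw [hsl1, hsl2]
      by_cases hterm : "--" ∈ tail
      · obtain ⟨m, hm⟩ := Option.isSome_iff_exists.mp ((PySem.List.index?_isSome_iff _ _).mpr hterm)
        obtain ⟨t1, t2, htail, hmlen, ht1⟩ := (PySem.List.index?_eq_some_iff _ _ _).mp hm
        subst htail
        rw [hm]
        split
        next heq => exact absurd heq (by simp)
        next nt heq =>
        have hnt : m = nt := Option.some.inj heq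
        subst hnt
        have hsl3 : PySem.List.slice (t1 ++ "--" :: t2) (some ((m : Int) + 1)) none = t2 := by
          rw [show ((m : Int) + 1) = ((m + 1 : Nat) : Int) by push_cast; ring,
              PySem.List.slice_from_natCast,
              show t1 ++ "--" :: t2 = (t1 ++ ["--"]) ++ t2 by simp,
              List.drop_append_of_le_length (by simp; omega)]
          simp [hmlen]; try omega
        have hsl4 : PySem.List.slice (t1 ++ "--" :: t2) none (some (m : Int)) = t1 := by
          rw [PySem.List.slice_to_natCast, List.take_append_of_le_length (by omega)]
          exact List.take_of_length_le (by omega)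
        rw [hsl3, hsl4]
        have hrec := ih t2 (P ++ pre) (E ++ t1)
          (by simp at hlen ⊢; omega)
          (by simp only [List.mem_append, not_or]; exact ⟨hP, hdpre⟩)
        rw [show (P ++ pre) ++ t2 = P ++ pre ++ t2 by simp] at hrec
        simp only [aLoop] at hrec
        rw [hrec]
        rw [pass0_false_append d pre _ hdpre]
        simp only [pass0]
        rw [pass0_true_append d t1 _ ht1]
        simp [pass0]
      · have hidx2 : PySem.List.index? tail "--" = none :=
          (PySem.List.index?_eq_none_iff _ _).mpr hterm
        rw [hidx2]
        rw [pass0_false_append d pre _ hdpre]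
        simp only [pass0]
        rw [pass0_true_not_mem d tail hterm]
        simp
    · -- no delimiter left
      have hidx : PySem.List.index? (P ++ rest) d = none := by
        rw [PySem.List.index?_eq_none_iff]; simp [hP, hmem]
      simp only [aLoop, hidx, pass0_false_not_mem d rest hmem]
      simp

-- all-hyphen test of B  vs  empty-filter test of A
lemma filter_iff_all (t : String) : (List.filter (fun c => decide (c ≠ '-')) t.toList = [])
    ↔ (t.toList.all (fun c => c = '-')) = true := by
  rw [List.filter_eq_nil_iff, List.all_eq_true]
  constructor
  · intro h c hc; simpa using h c hc
  · intro h c hc; simpa using h c hc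

-- One step of B's fold, in each of the three relevant shapes.
lemma bStep_term (d : String) (T E : List String) :
    bStep d ((T, E), true) "--" = ((T, E), false) := by simp [bStep]

lemma bStep_capture (d : String) (T E : List String) (t : String) (h1 : t ≠ "--") :
    bStep d ((T, E), true) t = ((T, E ++ [aReduce t]), true) := by
  simp only [bStep, if_true, if_neg h1]
  by_cases hcap : t ≠ "-" ∧ (t.toList.all (fun c => c = '-')) = true
  · rw [if_pos hcap]
    unfold aReduce
    rw [if_neg hcap.1, if_neg (not_not_intro ((filter_iff_all t).mpr hcap.2))]
  · rw [if_neg hcap]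
    unfold aReduce
    by_cases h2 : t = "-"
    · rw [if_pos h2]
    · have h3 : ¬ (t.toList.all (fun c => c = '-')) = true := fun h => hcap ⟨h2, h⟩
      rw [if_neg h2, if_pos (fun hfil => h3 ((filter_iff_all t).mp hfil))]

lemma bStep_delim (d : String) (T E : List String) :
    bStep d ((T, E), false) d = ((T, E), true) := by simp [bStep]

lemma bStep_keep (d : String) (T E : List String) (t : String) (h1 : t ≠ d) :
    bStep d ((T, E), false) t = ((T ++ [t], E), false) := by simp [bStep, h1]

-- B's fold computes pass0 with the reduction applied on the fly.
lemma foldB_spec (d : String) (ts : List String) :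
    ∀ T E g, List.foldl (bStep d) ((T, E), g) ts
      = ((T ++ (pass0 d g ts).1, E ++ ((pass0 d g ts).2).map aReduce),
         (List.foldl (bStep d) ((T, E), g) ts).2) := by
  induction ts with
  | nil => intro T E g; simp [pass0]
  | cons t ts ih =>
    intro T E g
    cases g with
    | true =>
      by_cases h1 : t = "--"
      · subst h1
        simp only [List.foldl_cons, bStep_term, pass0]
        exact ih T E false
      · simp only [List.foldl_cons, bStep_capture d T E t h1, pass0, if_neg h1]
        rw [ih]
        simp [List.append_assoc]
    | false =>
      by_cases h1 : t = d
      · subst h1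
        simp only [List.foldl_cons, bStep_delim, pass0]
        exact ih T E true
      · simp only [List.foldl_cons, bStep_keep d T E t h1, pass0, if_neg h1]
        rw [ih]
        simp [List.append_assoc]

-- ===== VERDICT (by name: the statement is the Claim_ definition above) =====
theorem extract_argument_group_spec : Claim_equal_extract_argument_group := by
  intro args d _ hpre
  unfold Spec_extract_argument_group extract_argument_group extract_argument_group_alt
  have hd : ¬ d = "--" := hpre
  rw [if_neg hd, if_neg hd]
  by_cases hmem : d ∈ args
  · rw [if_neg (by simpa using hmem)]
    have hA := aLoop_spec d args.length args [] [] (le_refl _) (by simp)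
    simp only [List.nil_append] at hA
    have hB := foldB_spec d args [] [] false
    simp only [List.nil_append] at hB
    rw [hA, hB]
  · rw [if_pos (by simpa using hmem)]
    have hB := foldB_spec d args [] [] false
    simp only [List.nil_append] at hB
    rw [hB, pass0_false_not_mem d args hmem]
    simp
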